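-- pv_equiv track=rewrite | github.com/cp5337/sx9 | .qodo/04-abe-iac/node-interview-generator/yaml_dsl_pipeline.py | map_technique_to_ptcc
-- ===== SOURCE A (Python) =====
-- from typing import Dict, List, Optional, Any, Tuple
--
-- def map_technique_to_ptcc(technique: Dict) -> Tuple[str, int]:
--     """Map MITRE technique to PTCC primitive."""
--     tech_id = technique.get("technique_id", "")
--     name = technique.get("name", "").lower()
--     description = technique.get("description", "").lower()
--
--     # Heuristic mapping based on technique characteristics
--     if any(x in name for x in ["credential", "password", "auth", "login"]):
--         return "AUTHENTICATE", 0x14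
--     elif any(x in name for x in ["create", "install", "deploy"]):
--         return "CREATE", 0x00
--     elif any(x in name for x in ["read", "query", "discover", "enum"]):
--         return "READ", 0x01
--     elif any(x in name for x in ["modify", "change", "alter"]):
--         return "UPDATE", 0x02
--     elif any(x in name for x in ["delete", "remove", "clear"]):
--         return "DELETE", 0x03
--     elif any(x in name for x in ["encrypt", "obfuscate"]):
--         return "ENCRYPT", 0x13
--     elif any(x in name for x in ["connect", "tunnel", "proxy"]):
--         return "CONNECT", 0x15
--     elif any(x in name for x in ["exfil", "transfer", "send"]):
--         return "SEND", 0x08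
--     elif any(x in name for x in ["receive", "download", "fetch"]):
--         return "RECEIVE", 0x09
--     elif any(x in name for x in ["inject", "transform"]):
--         return "TRANSFORM", 0x10
--     elif any(x in name for x in ["validate", "check", "verify"]):
--         return "VALIDATE", 0x12
--     elif any(x in name for x in ["signal", "beacon"]):
--         return "SIGNAL", 0x0C
--     elif any(x in name for x in ["route", "redirect"]):
--         return "ROUTE", 0x17
--     else:
--         return "READ", 0x01  # Default
-- ===== SOURCE B (Python) =====
-- # B: flat keyword->(priority, result) map; one accumulating pass selects the
-- # minimum-priority matching keyword instead of an ordered first-match branch chain.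
-- KEYWORDS = {}
-- for _prio, (_kws, _res) in enumerate([
--     (("credential", "password", "auth", "login"), ("AUTHENTICATE", 0x14)),
--     (("create", "install", "deploy"), ("CREATE", 0x00)),
--     (("read", "query", "discover", "enum"), ("READ", 0x01)),
--     (("modify", "change", "alter"), ("UPDATE", 0x02)),
--     (("delete", "remove", "clear"), ("DELETE", 0x03)),
--     (("encrypt", "obfuscate"), ("ENCRYPT", 0x13)),
--     (("connect", "tunnel", "proxy"), ("CONNECT", 0x15)),
--     (("exfil", "transfer", "send"), ("SEND", 0x08)),
--     (("receive", "download", "fetch"), ("RECEIVE", 0x09)),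
--     (("inject", "transform"), ("TRANSFORM", 0x10)),
--     (("validate", "check", "verify"), ("VALIDATE", 0x12)),
--     (("signal", "beacon"), ("SIGNAL", 0x0C)),
--     (("route", "redirect"), ("ROUTE", 0x17)),
-- ]):
--     for _kw in _kws:
--         KEYWORDS[_kw] = (_prio, _res)
--
-- def map_technique_to_ptcc(technique):
--     """Map MITRE technique to PTCC primitive (min-priority keyword selection)."""
--     name = technique.get("name", "").lower()
--     best = None
--     for kw, v in KEYWORDS.items():
--         if kw in name and (best is None or v[0] < best[0]):
--             best = v
--     return best[1] if best is not None else ("READ", 0x01)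
-- ===== Notes on version B (the rewrite author's own statement) =====
-- stated objective: alternative
-- what changed: Replaced the ordered 13-branch first-match if/elif chain with a flat keyword->(priority,result) map scanned in one accumulating pass that selects the minimum-priority matching keyword.
import Mathlib
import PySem

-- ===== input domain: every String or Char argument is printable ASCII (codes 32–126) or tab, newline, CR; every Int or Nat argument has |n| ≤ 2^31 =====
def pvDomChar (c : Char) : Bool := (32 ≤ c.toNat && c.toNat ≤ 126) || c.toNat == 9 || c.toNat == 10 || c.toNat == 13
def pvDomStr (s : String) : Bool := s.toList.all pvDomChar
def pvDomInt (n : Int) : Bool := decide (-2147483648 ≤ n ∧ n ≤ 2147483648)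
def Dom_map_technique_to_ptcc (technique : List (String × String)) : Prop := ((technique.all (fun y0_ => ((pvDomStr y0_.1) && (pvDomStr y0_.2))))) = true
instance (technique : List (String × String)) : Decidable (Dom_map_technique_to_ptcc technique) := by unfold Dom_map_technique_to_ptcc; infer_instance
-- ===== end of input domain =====

-- B replaces the first-match branch chain by a min-priority selection over a flat keyword map (alternative decomposition, same cost).
-- ===== PORT A =====
def map_technique_to_ptcc (technique : List (String × String)) : String × Int :=
  let _tech_id := PySem.Dict.getD (PySem.Dict.ofList technique) "technique_id" ""
  let name := PySem.Str.lower (PySem.Dict.getD (PySem.Dict.ofList technique) "name" "")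
  let _description := PySem.Str.lower (PySem.Dict.getD (PySem.Dict.ofList technique) "description" "")
  if ["credential", "password", "auth", "login"].any (fun x => PySem.Str.isIn x name) then ("AUTHENTICATE", 0x14)
  else if ["create", "install", "deploy"].any (fun x => PySem.Str.isIn x name) then ("CREATE", 0x00)
  else if ["read", "query", "discover", "enum"].any (fun x => PySem.Str.isIn x name) then ("READ", 0x01)
  else if ["modify", "change", "alter"].any (fun x => PySem.Str.isIn x name) then ("UPDATE", 0x02)
  else if ["delete", "remove", "clear"].any (fun x => PySem.Str.isIn x name) then ("DELETE", 0x03)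
  else if ["encrypt", "obfuscate"].any (fun x => PySem.Str.isIn x name) then ("ENCRYPT", 0x13)
  else if ["connect", "tunnel", "proxy"].any (fun x => PySem.Str.isIn x name) then ("CONNECT", 0x15)
  else if ["exfil", "transfer", "send"].any (fun x => PySem.Str.isIn x name) then ("SEND", 0x08)
  else if ["receive", "download", "fetch"].any (fun x => PySem.Str.isIn x name) then ("RECEIVE", 0x09)
  else if ["inject", "transform"].any (fun x => PySem.Str.isIn x name) then ("TRANSFORM", 0x10)
  else if ["validate", "check", "verify"].any (fun x => PySem.Str.isIn x name) then ("VALIDATE", 0x12)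
  else if ["signal", "beacon"].any (fun x => PySem.Str.isIn x name) then ("SIGNAL", 0x0C)
  else if ["route", "redirect"].any (fun x => PySem.Str.isIn x name) then ("ROUTE", 0x17)
  else ("READ", 0x01)

-- ===== PORT B =====
-- B's flat keyword map: keyword ↦ (priority, result), insertion order as built in Source B.
def ptccKeywords : List (String × Int × (String × Int)) :=
  [ ("credential", 0, ("AUTHENTICATE", 0x14)), ("password", 0, ("AUTHENTICATE", 0x14)),
    ("auth", 0, ("AUTHENTICATE", 0x14)), ("login", 0, ("AUTHENTICATE", 0x14)),
    ("create", 1, ("CREATE", 0x00)), ("install", 1, ("CREATE", 0x00)), ("deploy", 1, ("CREATE", 0x00)),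
    ("read", 2, ("READ", 0x01)), ("query", 2, ("READ", 0x01)), ("discover", 2, ("READ", 0x01)), ("enum", 2, ("READ", 0x01)),
    ("modify", 3, ("UPDATE", 0x02)), ("change", 3, ("UPDATE", 0x02)), ("alter", 3, ("UPDATE", 0x02)),
    ("delete", 4, ("DELETE", 0x03)), ("remove", 4, ("DELETE", 0x03)), ("clear", 4, ("DELETE", 0x03)),
    ("encrypt", 5, ("ENCRYPT", 0x13)), ("obfuscate", 5, ("ENCRYPT", 0x13)),
    ("connect", 6, ("CONNECT", 0x15)), ("tunnel", 6, ("CONNECT", 0x15)), ("proxy", 6, ("CONNECT", 0x15)),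
    ("exfil", 7, ("SEND", 0x08)), ("transfer", 7, ("SEND", 0x08)), ("send", 7, ("SEND", 0x08)),
    ("receive", 8, ("RECEIVE", 0x09)), ("download", 8, ("RECEIVE", 0x09)), ("fetch", 8, ("RECEIVE", 0x09)),
    ("inject", 9, ("TRANSFORM", 0x10)), ("transform", 9, ("TRANSFORM", 0x10)),
    ("validate", 10, ("VALIDATE", 0x12)), ("check", 10, ("VALIDATE", 0x12)), ("verify", 10, ("VALIDATE", 0x12)),
    ("signal", 11, ("SIGNAL", 0x0C)), ("beacon", 11, ("SIGNAL", 0x0C)),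
    ("route", 12, ("ROUTE", 0x17)), ("redirect", 12, ("ROUTE", 0x17)) ]

-- one step of Source B's accumulating loop: keep the minimum-priority match seen so far
def ptccStep (name : String) (best : Option (Int × (String × Int))) (x : String × Int × (String × Int)) :
    Option (Int × (String × Int)) :=
  if PySem.Str.isIn x.1 name then
    match best with
    | none => some x.2
    | some b => if x.2.1 < b.1 then some x.2 else some b
  else best

def map_technique_to_ptcc_alt (technique : List (String × String)) : String × Int :=
  let name := PySem.Str.lower (PySem.Dict.getD (PySem.Dict.ofList technique) "name" "")
  match ptccKeywords.foldl (ptccStep name) none with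
  | some b => b.2
  | none => ("READ", 0x01)

-- ===== PRECONDITION & SPEC =====
def Spec_map_technique_to_ptcc (technique : List (String × String)) (out : String × Int) : Prop := out = map_technique_to_ptcc_alt technique
instance (technique : List (String × String)) (out : String × Int) : Decidable (Spec_map_technique_to_ptcc technique out) := by unfold Spec_map_technique_to_ptcc; infer_instance

-- ===== CLAIM (what is proved, stated in full; the proofs are below) =====
def Claim_equal_map_technique_to_ptcc : Prop := ∀ (technique : List (String × String)), Dom_map_technique_to_ptcc technique → Spec_map_technique_to_ptcc technique (map_technique_to_ptcc technique)

-- ===== LEMMAS AND PROOFS =====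

-- grouped view of the rules, used only by the proofs
def ptccGroups : List (List String × (String × Int)) :=
  [ (["credential", "password", "auth", "login"], ("AUTHENTICATE", 0x14))
  , (["create", "install", "deploy"], ("CREATE", 0x00))
  , (["read", "query", "discover", "enum"], ("READ", 0x01))
  , (["modify", "change", "alter"], ("UPDATE", 0x02))
  , (["delete", "remove", "clear"], ("DELETE", 0x03))
  , (["encrypt", "obfuscate"], ("ENCRYPT", 0x13))
  , (["connect", "tunnel", "proxy"], ("CONNECT", 0x15))
  , (["exfil", "transfer", "send"], ("SEND", 0x08))
  , (["receive", "download", "fetch"], ("RECEIVE", 0x09))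
  , (["inject", "transform"], ("TRANSFORM", 0x10))
  , (["validate", "check", "verify"], ("VALIDATE", 0x12))
  , (["signal", "beacon"], ("SIGNAL", 0x0C))
  , (["route", "redirect"], ("ROUTE", 0x17)) ]

def ptccChain (name : String) : List (List String × (String × Int)) → String × Int
  | [] => ("READ", 0x01)
  | (kws, r) :: gs => if kws.any (fun k => PySem.Str.isIn k name) then r else ptccChain name gs

def ptccFlat (p : Int) : List (List String × (String × Int)) → List (String × Int × (String × Int))
  | [] => []
  | (kws, r) :: gs => kws.map (fun k => (k, p, r)) ++ ptccFlat (p + 1) gs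

theorem ptccFlat_prio_ge (p : Int) (gs : List (List String × (String × Int)))
    (x : String × Int × (String × Int)) (hx : x ∈ ptccFlat p gs) : p ≤ x.2.1 := by
  induction gs generalizing p with
  | nil => simp [ptccFlat] at hx
  | cons g gs ih =>
    rcases g with ⟨kws, r⟩
    simp only [ptccFlat, List.mem_append, List.mem_map] at hx
    rcases hx with ⟨k, _, rfl⟩ | h
    · simp
    · have := ih (p + 1) h; omega

theorem foldl_keep (name : String) (b : Int × (String × Int))
    (l : List (String × Int × (String × Int))) (hl : ∀ x ∈ l, b.1 ≤ x.2.1) :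
    l.foldl (ptccStep name) (some b) = some b := by
  induction l with
  | nil => rfl
  | cons x l ih =>
    have hb : b.1 ≤ x.2.1 := hl x (List.mem_cons_self ..)
    have : ptccStep name (some b) x = some b := by
      unfold ptccStep
      split_ifs with h
      · simp only []
        rw [if_neg (by omega)]
      · rfl
    rw [List.foldl_cons, this]
    exact ih fun y hy => hl y (List.mem_cons_of_mem _ hy)

theorem foldl_group (name : String) (p : Int) (r : String × Int) (kws : List String) :
    (kws.map (fun k => (k, p, r))).foldl (ptccStep name) none =
      if kws.any (fun k => PySem.Str.isIn k name) then some (p, r) else none := by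
  induction kws with
  | nil => rfl
  | cons k kws ih =>
    simp only [List.map_cons, List.foldl_cons, List.any_cons]
    by_cases h : PySem.Str.isIn k name = true
    · have hstep : ptccStep name none (k, p, r) = some (p, r) := by
        simp only [ptccStep]; rw [if_pos h]
      rw [hstep, foldl_keep name (p, r) _ (fun x hx => by
        rcases List.mem_map.mp hx with ⟨k', _, rfl⟩; exact le_refl _)]
      rw [if_pos (by rw [h, Bool.true_or])]
    · have hstep : ptccStep name none (k, p, r) = none := by
        simp only [ptccStep]; rw [if_neg h]
      rw [hstep, ih]
      simp only [Bool.not_eq_true] at h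
      simp only [h, Bool.false_or]

theorem ptccMain (name : String) (gs : List (List String × (String × Int))) (p : Int) :
    (match (ptccFlat p gs).foldl (ptccStep name) none with
      | some b => b.2
      | none => ("READ", (0x01 : Int))) = ptccChain name gs := by
  induction gs generalizing p with
  | nil => rfl
  | cons g gs ih =>
    rcases g with ⟨kws, r⟩
    simp only [ptccFlat, List.foldl_append, ptccChain]
    rw [foldl_group]
    by_cases h : kws.any (fun k => PySem.Str.isIn k name)
    · rw [if_pos h, if_pos h,
        foldl_keep name (p, r) _ (fun x hx => by
          have := ptccFlat_prio_ge (p + 1) gs x hx; omega)]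
    · rw [if_neg h, if_neg h]; exact ih (p + 1)

theorem ptccKeywords_eq_flat : ptccKeywords = ptccFlat 0 ptccGroups := by decide

-- ===== VERDICT (by name: the statement is the Claim_ definition above) =====
theorem map_technique_to_ptcc_spec : Claim_equal_map_technique_to_ptcc := by
  intro technique _
  unfold Spec_map_technique_to_ptcc map_technique_to_ptcc map_technique_to_ptcc_alt
  rw [ptccKeywords_eq_flat]
  rw [ptccMain (PySem.Str.lower (PySem.Dict.getD (PySem.Dict.ofList technique) "name" ""))
    ptccGroups 0]
  rfl
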